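-- pv_equiv track=rewrite | github.com/kwshi/pyjff | pyjff/grammar.py | _chomsky_normalize_del
-- ===== SOURCE A (Python) =====
-- def _copy_rules(rules):
--     return {left: set(targets) for left, targets in rules.items()}
--
-- def _inline_nullable(string, symbol):
--     if symbol not in string:
--         yield string
--         return
--
--     index = string.index(symbol)
--     for rest in _inline_nullable(string[index + 1:], symbol):
--         yield string[:index] + rest
--         yield string[: index + 1] + rest
--
-- def _chomsky_normalize_del(rules):
--
--     nullables = set()
--     new_nullables = True
--     while new_nullables:
--         new_nullables = False
--         for source, targets in rules.items():
--             if source in nullables: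
--                 continue
--
--             for target in targets:
--                 nullable = True
--                 for symbol in target:
--                     if symbol not in nullables:
--                         nullable = False
--                         break
--                 if nullable:
--                     nullables.add(source)
--                     new_nullables = True
--                     break
--
--     new_rules = _copy_rules(rules)
--     for source, targets in rules.items():
--         for target in targets:
--             for nullable in set(target) & nullables:
--                 for new_target in _inline_nullable(target, nullable):
--                     new_rules[source].add(new_target)
--
--     for source in nullables:
--         new_rules[source].discard(())
--
--     return new_rules
-- ===== SOURCE B (Python) =====
-- def _pick(target, symbol, m):
--     # keep the j-th occurrence of symbol iff bit j of m is set; keep everything else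
--     out = []
--     for x in target:
--         if x == symbol:
--             if m & 1:
--                 out.append(x)
--             m >>= 1
--         else:
--             out.append(x)
--     return tuple(out)
--
-- def _chomsky_normalize_del(rules):
--     # nullable sources by bounded rounds: each useful round adds at least one source
--     nullables = set()
--     for _ in range(len(rules) + 1):
--         new = [s for s, ts in rules.items()
--                if s not in nullables
--                and any(all(x in nullables for x in t) for t in ts)]
--         if not new:
--             break
--         nullables.update(new)
--
--     # build the result in one pass: per source, base targets plus every
--     # bitmask-selected inlining of each nullable symbol, then drop () if nullable
--     new_rules = {}
--     for source, targets in rules.items():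
--         acc = set(targets)
--         for target in targets:
--             for symbol in dict.fromkeys(target):
--                 if symbol in nullables:
--                     for m in range(1 << target.count(symbol)):
--                         acc.add(_pick(target, symbol, m))
--         if source in nullables:
--             acc.discard(())
--         new_rules[source] = acc
--     return new_rules
-- ===== Notes on version B (the rewrite author's own statement) =====
-- stated objective: alternative
-- what changed: B finds nullable sources by bounded rounds collected with list comprehensions (no change flag, no in-pass mutation, no break/continue) and replaces A's recursive per-occurrence inlining generator by a direct bitmask enumeration (_pick keeps the j-th occurrence of the symbol iff bit j of the mask is set), building each result entry in a single pass over the rules instead of copying the dict and mutating it in place.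
import Mathlib
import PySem

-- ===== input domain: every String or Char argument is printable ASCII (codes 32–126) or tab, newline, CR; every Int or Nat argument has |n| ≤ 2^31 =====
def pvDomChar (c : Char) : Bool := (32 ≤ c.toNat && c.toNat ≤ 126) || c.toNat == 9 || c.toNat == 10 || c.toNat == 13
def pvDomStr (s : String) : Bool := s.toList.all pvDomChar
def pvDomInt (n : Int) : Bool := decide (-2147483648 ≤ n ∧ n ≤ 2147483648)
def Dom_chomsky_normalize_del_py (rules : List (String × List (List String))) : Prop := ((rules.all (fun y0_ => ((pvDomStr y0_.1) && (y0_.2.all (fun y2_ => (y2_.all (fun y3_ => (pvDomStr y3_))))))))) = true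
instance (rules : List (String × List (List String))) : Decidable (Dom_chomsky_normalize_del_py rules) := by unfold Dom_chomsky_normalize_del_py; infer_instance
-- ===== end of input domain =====

-- B replaces A's repeated change-flag rescans for nullable sources by bounded rounds collected
-- with comprehensions, and A's recursive per-occurrence inlining generator by a direct bitmask
-- enumeration over the occurrences of the nullable symbol, building each result dict entry in a
-- single pass (objective: alternative; the return values are dicts of sets, proved equal as the
-- ports' insertion-ordered lists).

-- ===== PORT A =====
-- _inline_nullable: `if symbol not in string` = index? none; string.index = first occurrence
def pvInlineA (s : List String) (sym : String) : List (List String) :=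
  match hidx : PySem.List.index? s sym with
  | none => [s]
  | some i =>
    (pvInlineA (s.drop (i + 1)) sym).flatMap
      (fun rest => [s.take i ++ rest, s.take (i + 1) ++ rest])
termination_by s.length
decreasing_by
  simp only [PySem.List.index?] at hidx
  have : s ≠ [] := by rintro rfl; simp at hidx
  have := List.length_pos_iff.mpr this
  simp; omega

-- one pass of the while-loop body: the flag/break loops over targets and symbols are any/all
def pvPassA (rules : List (String × List (List String)))
    (st : PySem.Set String × Bool) : PySem.Set String × Bool :=
  rules.foldl
    (fun st p =>
      if PySem.Set.contains st.1 p.1 then st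
      else if p.2.any (fun t => t.all (fun x => PySem.Set.contains st.1 x)) then
        (PySem.Set.add st.1 p.1, true)
      else st)
    st

-- `while new_nullables:`; a pass that adds something strictly grows the nullable set, whose
-- elements are sources of `rules`, so `rules.length + 1` iterations always reach the fixpoint
def pvLoopA (rules : List (String × List (List String))) :
    Nat → PySem.Set String → PySem.Set String
  | 0, nul => nul
  | fuel + 1, nul =>
    let st := pvPassA rules (nul, false)
    if st.2 then pvLoopA rules fuel st.1 else st.1

def pvCopyRules (rules : List (String × List (List String))) :
    PySem.Dict String (List (List String)) :=
  rules.foldl (fun d p => d.insert p.1 (PySem.Set.ofList p.2)) PySem.Dict.empty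

def chomsky_normalize_del_py (rules : List (String × List (List String))) :
    List (String × List (List String)) :=
  let nullables := pvLoopA rules (rules.length + 1) PySem.Set.empty
  let new_rules := pvCopyRules rules
  let new_rules :=
    rules.foldl
      (fun d p =>
        p.2.foldl
          (fun d t =>
            (PySem.Set.inter (PySem.Set.ofList t) nullables).foldl
              (fun d nb =>
                (pvInlineA t nb).foldl
                  (fun d nt => d.modify p.1 [] (fun st => PySem.Set.add st nt)) d)
              d)
          d)
      new_rules
  -- new_rules[source].discard(()): source is always a key (nullables ⊆ sources)
  let new_rules :=
    nullables.foldl (fun d s => d.modify s [] (fun st => PySem.Set.discard st [])) new_rules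
  new_rules.items

-- ===== PORT B =====
-- _pick: keep the j-th occurrence of symbol iff bit j of m is set
def pvPickB (sym : String) (m : Int) : List String → List String
  | [] => []
  | x :: xs =>
    if x == sym then
      if PySem.Int.band m 1 ≠ 0 then x :: pvPickB sym (m >>> (1:Nat)) xs
      else pvPickB sym (m >>> (1:Nat)) xs
    else x :: pvPickB sym m xs

def pvLoopB (rules : List (String × List (List String))) :
    Nat → PySem.Set String → PySem.Set String
  | 0, nul => nul
  | fuel + 1, nul =>
    let nw :=
      (rules.filter
        (fun p =>
          !PySem.Set.contains nul p.1 &&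
            p.2.any (fun t => t.all (fun x => PySem.Set.contains nul x)))).map Prod.fst
    if nw.isEmpty then nul else pvLoopB rules fuel (PySem.Set.update nul nw)

def chomsky_normalize_del_py_alt (rules : List (String × List (List String))) :
    List (String × List (List String)) :=
  let nullables := pvLoopB rules (rules.length + 1) PySem.Set.empty
  (rules.foldl
      (fun d p =>
        let acc :=
          p.2.foldl
            (fun acc t =>
              (PySem.List.dedup t).foldl
                (fun acc sym =>
                  if PySem.Set.contains nullables sym then
                    (PySem.List.pyRange 0 ((1 : Int) <<< (t.count sym)) 1).foldl
                      (fun acc m => PySem.Set.add acc (pvPickB sym m t)) acc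
                  else acc)
                acc)
            (PySem.Set.ofList p.2)
        let acc := if PySem.Set.contains nullables p.1 then PySem.Set.discard acc [] else acc
        d.insert p.1 acc)
      PySem.Dict.empty).items

-- ===== PRECONDITION & SPEC =====
-- Pre_ requires distinct left-hand sides: the argument stands for a Python dict, whose keys
-- are unique by construction; association lists with duplicated keys represent no dict.
def Pre_chomsky_normalize_del_py (rules : List (String × List (List String))) : Prop :=
  (rules.map Prod.fst).Nodup
instance (rules : List (String × List (List String))) : Decidable (Pre_chomsky_normalize_del_py rules) := by unfold Pre_chomsky_normalize_del_py; infer_instance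

def pvWitness_chomsky_normalize_del_py : (List (String × List (List String))) :=
  [("S", [["A", "b"], []]), ("A", [["a"]])]

def Spec_chomsky_normalize_del_py (rules : List (String × List (List String))) (out : List (String × List (List String))) : Prop := out = chomsky_normalize_del_py_alt rules
instance (rules : List (String × List (List String))) (out : List (String × List (List String))) : Decidable (Spec_chomsky_normalize_del_py rules out) := by unfold Spec_chomsky_normalize_del_py; infer_instance

-- ===== CLAIM (what is proved, stated in full; the proofs are below) =====
def Claim_equal_chomsky_normalize_del_py : Prop := ∀ (rules : List (String × List (List String))), Dom_chomsky_normalize_del_py rules → Pre_chomsky_normalize_del_py rules → Spec_chomsky_normalize_del_py rules (chomsky_normalize_del_py rules)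

-- ===== LEMMAS AND PROOFS =====

theorem pvPickB_not_mem (sym : String) (m : Int) (s : List String) (h : sym ∉ s) :
    pvPickB sym m s = s := by
  induction s generalizing m with
  | nil => rfl
  | cons x xs ih =>
    simp only [List.mem_cons, not_or] at h
    have hb : (x == sym) = false := by simpa using fun e => h.1 e.symm
    simp only [pvPickB, hb, Bool.false_eq_true, if_false]
    rw [ih _ h.2]

theorem pvPickB_append (sym : String) (m : Int) (a u : List String) (h : sym ∉ a) :
    pvPickB sym m (a ++ u) = a ++ pvPickB sym m u := by
  induction a generalizing m with
  | nil => rfl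
  | cons x xs ih =>
    simp only [List.mem_cons, not_or] at h
    have hb : (x == sym) = false := by simpa using fun e => h.1 e.symm
    simp only [List.cons_append, pvPickB, hb, Bool.false_eq_true, if_false]
    rw [ih _ h.2]

theorem pvPickB_cons_nat (sym : String) (d : List String) (n : Nat) :
    pvPickB sym ((n : Nat) : Int) (sym :: d)
      = (if n % 2 = 1 then [sym] else []) ++ pvPickB sym ((n / 2 : Nat) : Int) d := by
  have hband : PySem.Int.band (n : Int) 1 = ((n % 2 : Nat) : Int) := by
    have h1 : ((1 : Nat) : Int) = (1 : Int) := by norm_num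
    have := PySem.Int.band_natCast n 1
    rw [h1] at this
    rw [this, Nat.and_one_is_mod]
  have hshift : ((n : Int) >>> (1 : Nat)) = ((n / 2 : Nat) : Int) := by
    rw [← Int.natCast_shiftRight, Nat.shiftRight_eq_div_pow]
  simp only [pvPickB, beq_self_eq_true, if_true, hband, hshift]
  rcases Nat.mod_two_eq_zero_or_one n with h | h <;>
    simp [h, show ((1:Nat):Int) ≠ 0 by norm_num]

theorem pvRange_double (n : Nat) :
    List.range (2 * n) = (List.range n).flatMap (fun q => [2 * q, 2 * q + 1]) := by
  induction n with
  | zero => rfl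
  | succ n ih =>
    have h2 : 2 * (n + 1) = (2 * n) + 1 + 1 := by omega
    rw [h2, List.range_succ, List.range_succ, ih, List.range_succ]
    simp

theorem pvInlineA_eq (s : List String) (sym : String) :
    pvInlineA s sym = (List.range (2 ^ s.count sym)).map (fun q : Nat => pvPickB sym (q : Int) s) := by
  fun_induction pvInlineA s sym with
  | case1 s hidx =>
    have hmem : sym ∉ s := by
      simpa [PySem.List.index?, List.idxOf?_eq_none_iff] using hidx
    have hc : s.count sym = 0 := List.count_eq_zero.mpr hmem
    simp [hc, pvPickB_not_mem sym _ s hmem]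
  | case2 s i hidx ih =>
    simp only [PySem.List.index?] at hidx
    rw [List.idxOf?_eq_some_iff] at hidx
    obtain ⟨hi, hget, hbefore⟩ := hidx
    have htk : sym ∉ s.take i := by
      intro hm
      obtain ⟨j, hj, hjs⟩ := List.getElem_of_mem hm
      have hjlt : j < i := by simp [List.length_take] at hj; omega
      refine hbefore j hjlt ?_
      rw [← hjs]; exact List.getElem_take.symm
    have htk1 : s.take (i + 1) = s.take i ++ [sym] := by
      rw [← List.take_append_getElem hi, hget]
    have hdecomp : s.take i ++ sym :: s.drop (i + 1) = s := by
      rw [← hget, List.getElem_cons_drop hi]; exact List.take_append_drop i s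
    have hcount : s.count sym = (s.drop (i + 1)).count sym + 1 := by
      conv_lhs => rw [← hdecomp]
      simp [List.count_append, Nat.add_comm, List.count_eq_zero.mpr htk]
    set d := s.drop (i + 1) with hd
    set k := d.count sym with hk
    have hpow : 2 ^ s.count sym = 2 * 2 ^ k := by rw [hcount]; ring
    rw [ih, hpow, pvRange_double, List.flatMap_map, List.map_flatMap]
    refine List.flatMap_congr ?_
    intro q hq
    have e1 : pvPickB sym ((2 * q : Nat) : Int) s
        = s.take i ++ pvPickB sym ((q : Nat) : Int) d := by
      conv_lhs => rw [← hdecomp]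
      rw [pvPickB_append sym _ _ _ htk, pvPickB_cons_nat]
      have : (2 * q) % 2 = 0 := by omega
      have h2 : (2 * q) / 2 = q := by omega
      simp [this, h2]
    have e2 : pvPickB sym ((2 * q + 1 : Nat) : Int) s
        = s.take (i + 1) ++ pvPickB sym ((q : Nat) : Int) d := by
      conv_lhs => rw [← hdecomp]
      rw [pvPickB_append sym _ _ _ htk, pvPickB_cons_nat]
      have : (2 * q + 1) % 2 = 1 := by omega
      have h2 : (2 * q + 1) / 2 = q := by omega
      simp [this, h2, htk1]
    have e1' := e1
    have e2' := e2
    push_cast at e1' e2'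
    simp [e1', e2', htk1]

-- ===== nullable-set equivalence =====
def pvJustP (rules : List (String × List (List String))) (P : String → Prop) (s : String) : Prop :=
  ∃ ts, (s, ts) ∈ rules ∧ ∃ t ∈ ts, ∀ x ∈ t, P x

def pvClosedP (rules : List (String × List (List String))) (P : String → Prop) : Prop :=
  ∀ s, pvJustP rules P s → P s

theorem pvCond_iff (nul : PySem.Set String) (ts : List (List String)) :
    (ts.any (fun t => t.all (fun x => PySem.Set.contains nul x))) = true
      ↔ ∃ t ∈ ts, ∀ x ∈ t, x ∈ nul := by
  simp [List.any_eq_true, List.all_eq_true, PySem.Set.contains_iff]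

theorem pvPassA_spec (l : List (String × List (List String)))
    (st : PySem.Set String × Bool) :
    ∃ ex, (pvPassA l st).1 = st.1 ++ ex ∧ (∀ x ∈ ex, x ∈ l.map Prod.fst) ∧
      (pvPassA l st).2 = (st.2 || !ex.isEmpty) := by
  induction l generalizing st with
  | nil => exact ⟨[], by simp [pvPassA]⟩
  | cons p l ih =>
    have hstep : pvPassA (p :: l) st
        = pvPassA l (if PySem.Set.contains st.1 p.1 then st
            else if p.2.any (fun t => t.all (fun x => PySem.Set.contains st.1 x)) then
              (PySem.Set.add st.1 p.1, true) else st) := by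
      simp [pvPassA]
    by_cases h1 : PySem.Set.contains st.1 p.1 = true
    · rw [hstep, if_pos h1]
      obtain ⟨ex, he1, he2, he3⟩ := ih st
      exact ⟨ex, he1, fun x hx => by simp [he2 x hx], he3⟩
    · by_cases h2 : (p.2.any (fun t => t.all (fun x => PySem.Set.contains st.1 x))) = true
      · rw [hstep, if_neg h1, if_pos h2]
        obtain ⟨ex, he1, he2, he3⟩ := ih (PySem.Set.add st.1 p.1, true)
        refine ⟨p.1 :: ex, ?_, ?_, ?_⟩
        · rw [he1]
          simp only
          rw [PySem.Set.add_of_not_mem (by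
            intro hm; exact h1 ((PySem.Set.contains_iff _ _).mpr hm))]
          simp
        · intro x hx
          rcases List.mem_cons.mp hx with rfl | hx
          · simp
          · simp [he2 x hx]
        · rw [he3]; simp
      · rw [hstep, if_neg h1, if_neg h2]
        obtain ⟨ex, he1, he2, he3⟩ := ih st
        exact ⟨ex, he1, fun x hx => by simp [he2 x hx], he3⟩

theorem pvPassA_nodup (l : List (String × List (List String)))
    (st : PySem.Set String × Bool) (h : st.1.Nodup) : (pvPassA l st).1.Nodup := by
  induction l generalizing st with
  | nil => simpa [pvPassA]
  | cons p l ih =>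
    have hstep : pvPassA (p :: l) st
        = pvPassA l (if PySem.Set.contains st.1 p.1 then st
            else if p.2.any (fun t => t.all (fun x => PySem.Set.contains st.1 x)) then
              (PySem.Set.add st.1 p.1, true) else st) := by
      simp [pvPassA]
    rw [hstep]
    split_ifs with h1 h2
    · exact ih st h
    · exact ih _ (PySem.Set.nodup_add _ _ h)
    · exact ih st h

theorem pvPassA_sound (rules : List (String × List (List String)))
    (P : String → Prop) (hP : pvClosedP rules P) (l : List (String × List (List String)))
    (hl : ∀ p ∈ l, p ∈ rules) (st : PySem.Set String × Bool)
    (hst : ∀ x ∈ st.1, P x) : ∀ x ∈ (pvPassA l st).1, P x := by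
  induction l generalizing st with
  | nil => simpa [pvPassA]
  | cons p l ih =>
    have hstep : pvPassA (p :: l) st
        = pvPassA l (if PySem.Set.contains st.1 p.1 then st
            else if p.2.any (fun t => t.all (fun x => PySem.Set.contains st.1 x)) then
              (PySem.Set.add st.1 p.1, true) else st) := by
      simp [pvPassA]
    rw [hstep]
    have hl' : ∀ q ∈ l, q ∈ rules := fun q hq => hl q (List.mem_cons_of_mem _ hq)
    split_ifs with h1 h2
    · exact ih hl' st hst
    · refine ih hl' _ ?_
      intro x hx
      rcases (PySem.Set.mem_add _ _ _).mp hx with hx | hx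
      · exact hst x hx
      · subst hx
        obtain ⟨t, ht, hall⟩ := (pvCond_iff st.1 p.2).mp h2
        exact hP p.1 ⟨p.2, by simpa using hl p (List.mem_cons_self), t, ht,
          fun y hy => hst y (hall y hy)⟩
    · exact ih hl' st hst

theorem pvPassA_stable (l : List (String × List (List String)))
    (st : PySem.Set String × Bool) (h : (pvPassA l st).2 = false) :
    (pvPassA l st).1 = st.1 ∧ ∀ p ∈ l, p.1 ∈ st.1 ∨
      (p.2.any (fun t => t.all (fun x => PySem.Set.contains st.1 x))) = false := by
  induction l generalizing st with
  | nil => simp [pvPassA] at h ⊢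
  | cons p l ih =>
    have hstep : pvPassA (p :: l) st
        = pvPassA l (if PySem.Set.contains st.1 p.1 then st
            else if p.2.any (fun t => t.all (fun x => PySem.Set.contains st.1 x)) then
              (PySem.Set.add st.1 p.1, true) else st) := by
      simp [pvPassA]
    rw [hstep] at h ⊢
    by_cases h1 : PySem.Set.contains st.1 p.1 = true
    · rw [if_pos h1] at h ⊢
      obtain ⟨ha, hb⟩ := ih st h
      exact ⟨ha, fun q hq => by
        rcases List.mem_cons.mp hq with rfl | hq
        · exact Or.inl ((PySem.Set.contains_iff _ _).mp h1)
        · exact hb q hq⟩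
    · by_cases h2 : (p.2.any (fun t => t.all (fun x => PySem.Set.contains st.1 x))) = true
      · rw [if_neg h1, if_pos h2] at h
        obtain ⟨ex, -, -, he3⟩ := pvPassA_spec l (PySem.Set.add st.1 p.1, true)
        rw [he3] at h; simp at h
      · rw [if_neg h1, if_neg h2] at h ⊢
        obtain ⟨ha, hb⟩ := ih st h
        exact ⟨ha, fun q hq => by
          rcases List.mem_cons.mp hq with rfl | hq
          · exact Or.inr (by simpa using h2)
          · exact hb q hq⟩

theorem pvLoopA_sound (rules : List (String × List (List String)))
    (P : String → Prop) (hP : pvClosedP rules P) :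
    ∀ (fuel : Nat) (nul : PySem.Set String), (∀ x ∈ nul, P x) →
      ∀ x ∈ pvLoopA rules fuel nul, P x := by
  intro fuel
  induction fuel with
  | zero => intro nul h x hx; exact h x hx
  | succ fuel ih =>
    intro nul h x hx
    simp only [pvLoopA] at hx
    by_cases hch : (pvPassA rules (nul, false)).2 = true
    · rw [if_pos hch] at hx
      exact ih _ (pvPassA_sound rules P hP rules (fun p hp => hp) (nul, false) h) x hx
    · rw [if_neg hch] at hx
      exact pvPassA_sound rules P hP rules (fun p hp => hp) (nul, false) h x hx

theorem pvNodupSubsetLen {l l' : List String} (h : l.Nodup) (hs : l ⊆ l') :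
    l.length ≤ l'.length := by
  classical
  calc l.length = l.toFinset.card := (List.toFinset_card_of_nodup h).symm
  _ ≤ l'.toFinset.card := Finset.card_le_card (fun x hx => by
      simp only [List.mem_toFinset] at *; exact hs hx)
  _ ≤ l'.length := l'.toFinset_card_le

theorem pvLoopA_closed (rules : List (String × List (List String)))
    (hnd : (rules.map Prod.fst).Nodup) :
    ∀ (fuel : Nat) (nul : PySem.Set String), nul.Nodup →
      (∀ x ∈ nul, x ∈ rules.map Prod.fst) →
      rules.length + 1 ≤ fuel + nul.length →
      pvClosedP rules (· ∈ pvLoopA rules fuel nul) := by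
  intro fuel
  induction fuel with
  | zero =>
    intro nul hnod hsub hlen
    have := pvNodupSubsetLen hnod hsub
    simp only [List.length_map] at this
    exfalso; omega
  | succ fuel ih =>
    intro nul hnod hsub hlen
    simp only [pvLoopA]
    obtain ⟨ex, he1, he2, he3⟩ := pvPassA_spec rules (nul, false)
    by_cases hch : (pvPassA rules (nul, false)).2 = true
    · rw [if_pos hch]
      have hexne : ex ≠ [] := by
        intro hemp; rw [hemp] at he3; simp at he3; rw [he3] at hch; simp at hch
      refine ih (pvPassA rules (nul, false)).1
        (pvPassA_nodup rules (nul, false) hnod) ?_ ?_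
      · intro x hx
        rw [he1] at hx
        rcases List.mem_append.mp hx with hx | hx
        · exact hsub x hx
        · exact he2 x hx
      · rw [he1]
        have : 1 ≤ ex.length := by
          cases ex with
          | nil => exact absurd rfl hexne
          | cons a l => simp
        simp only [List.length_append]
        omega
    · rw [if_neg hch]
      obtain ⟨ha, hb⟩ := pvPassA_stable rules (nul, false)
        (Bool.not_eq_true _ ▸ hch)
      rw [ha]
      intro s hj
      obtain ⟨ts, hmem, t, ht, hall⟩ := hj
      rcases hb (s, ts) hmem with h | h
      · exact h
      · have hcc := (pvCond_iff nul ts).mpr ⟨t, ht, hall⟩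
        rw [h] at hcc
        simp at hcc

theorem pvStepB_mem (rules : List (String × List (List String)))
    (nul : PySem.Set String) (x : String)
    (hx : x ∈ (rules.filter
        (fun p => !PySem.Set.contains nul p.1 &&
          p.2.any (fun t => t.all (fun y => PySem.Set.contains nul y)))).map Prod.fst) :
    x ∉ nul ∧ ∃ ts, (x, ts) ∈ rules ∧ ∃ t ∈ ts, ∀ y ∈ t, y ∈ nul := by
  obtain ⟨p, hp, rfl⟩ := List.mem_map.mp hx
  have hmem := List.mem_of_mem_filter hp
  have hcond := List.of_mem_filter hp
  simp only [Bool.and_eq_true, Bool.not_eq_true'] at hcond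
  refine ⟨fun hm => by
      rw [(PySem.Set.contains_iff _ _).mpr hm] at hcond; simp at hcond, ?_⟩
  exact ⟨p.2, by simpa using hmem, (pvCond_iff nul p.2).mp hcond.2⟩

theorem pvLoopB_sound (rules : List (String × List (List String)))
    (P : String → Prop) (hP : pvClosedP rules P) :
    ∀ (fuel : Nat) (nul : PySem.Set String), (∀ x ∈ nul, P x) →
      ∀ x ∈ pvLoopB rules fuel nul, P x := by
  intro fuel
  induction fuel with
  | zero => intro nul h x hx; exact h x hx
  | succ fuel ih =>
    intro nul h x hx
    simp only [pvLoopB] at hx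
    set nw := (rules.filter
        (fun p => !PySem.Set.contains nul p.1 &&
          p.2.any (fun t => t.all (fun y => PySem.Set.contains nul y)))).map Prod.fst with hnw
    by_cases hemp : nw.isEmpty = true
    · rw [if_pos hemp] at hx; exact h x hx
    · rw [if_neg hemp] at hx
      refine ih _ ?_ x hx
      intro y hy
      rcases (PySem.Set.mem_update _ _ _).mp hy with hy | hy
      · exact h y hy
      · obtain ⟨-, ts, hmem, t, ht, hall⟩ := pvStepB_mem rules nul y hy
        exact hP y ⟨ts, hmem, t, ht, fun z hz => h z (hall z hz)⟩

theorem pvLoopB_closed (rules : List (String × List (List String)))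
    (hnd : (rules.map Prod.fst).Nodup) :
    ∀ (fuel : Nat) (nul : PySem.Set String), nul.Nodup →
      (∀ x ∈ nul, x ∈ rules.map Prod.fst) →
      rules.length + 1 ≤ fuel + nul.length →
      pvClosedP rules (· ∈ pvLoopB rules fuel nul) := by
  intro fuel
  induction fuel with
  | zero =>
    intro nul hnod hsub hlen
    have := pvNodupSubsetLen hnod hsub
    simp only [List.length_map] at this
    exfalso; omega
  | succ fuel ih =>
    intro nul hnod hsub hlen
    simp only [pvLoopB]
    set nw := (rules.filter
        (fun p => !PySem.Set.contains nul p.1 &&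
          p.2.any (fun t => t.all (fun y => PySem.Set.contains nul y)))).map Prod.fst with hnw
    by_cases hemp : nw.isEmpty = true
    · rw [if_pos hemp]
      intro s hj
      obtain ⟨ts, hmem, t, ht, hall⟩ := hj
      by_contra hs
      have : (s, ts) ∈ rules.filter
          (fun p => !PySem.Set.contains nul p.1 &&
            p.2.any (fun t => t.all (fun y => PySem.Set.contains nul y))) := by
        refine List.mem_filter.mpr ⟨hmem, ?_⟩
        simp only [Bool.and_eq_true, Bool.not_eq_true']
        constructor
        · rw [← Bool.not_eq_true]
          intro hc
          exact hs ((PySem.Set.contains_iff _ _).mp hc)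
        · exact (pvCond_iff nul ts).mpr ⟨t, ht, hall⟩
      have : s ∈ nw := by rw [hnw]; exact List.mem_map.mpr ⟨(s, ts), this, rfl⟩
      rw [List.isEmpty_iff] at hemp
      rw [hemp] at this
      simp at this
    · rw [if_neg hemp]
      have hgrow : nul.length + 1 ≤ (PySem.Set.update nul nw).length := by
        obtain ⟨z, hz⟩ := List.exists_mem_of_ne_nil nw (by
          intro h0; rw [h0] at hemp; simp at hemp)
        have hznul : z ∉ nul := (pvStepB_mem rules nul z (hnw ▸ hz)).1
        have hzin : z ∈ PySem.Set.update nul nw :=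
          (PySem.Set.mem_update _ _ _).mpr (Or.inr hz)
        have hsubu : nul ⊆ PySem.Set.update nul nw := fun y hy =>
          (PySem.Set.mem_update _ _ _).mpr (Or.inl hy)
        have hsubz : (z :: nul) ⊆ PySem.Set.update nul nw := by
          intro y hy
          rcases List.mem_cons.mp hy with rfl | hy
          · exact hzin
          · exact hsubu hy
        have hndz : (z :: nul).Nodup := List.nodup_cons.mpr ⟨hznul, hnod⟩
        have := pvNodupSubsetLen hndz hsubz
        simpa using this
      refine ih (PySem.Set.update nul nw) (PySem.Set.nodup_update _ _ hnod) ?_ ?_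
      · intro x hx
        rcases (PySem.Set.mem_update _ _ _).mp hx with hx | hx
        · exact hsub x hx
        · obtain ⟨-, ts, hmem, -⟩ := pvStepB_mem rules nul x hx
          exact List.mem_map.mpr ⟨(x, ts), hmem, rfl⟩
      · omega

theorem pvNull_equiv (rules : List (String × List (List String)))
    (hnd : (rules.map Prod.fst).Nodup) (x : String) :
    x ∈ pvLoopA rules (rules.length + 1) PySem.Set.empty
      ↔ x ∈ pvLoopB rules (rules.length + 1) PySem.Set.empty := by
  have hA := pvLoopA_closed rules hnd (rules.length + 1) PySem.Set.empty
    (by simp [PySem.Set.empty]) (by simp [PySem.Set.empty]) (by simp)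
  have hB := pvLoopB_closed rules hnd (rules.length + 1) PySem.Set.empty
    (by simp [PySem.Set.empty]) (by simp [PySem.Set.empty]) (by simp)
  constructor
  · intro hx
    exact pvLoopA_sound rules _ hB (rules.length + 1) PySem.Set.empty
      (by simp [PySem.Set.empty]) x hx
  · intro hx
    exact pvLoopB_sound rules _ hA (rules.length + 1) PySem.Set.empty
      (by simp [PySem.Set.empty]) x hx

-- ===== dict plumbing =====
theorem pvLoopA_nodup (rules : List (String × List (List String))) :
    ∀ (fuel : Nat) (nul : PySem.Set String), nul.Nodup →
      (pvLoopA rules fuel nul).Nodup := by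
  intro fuel
  induction fuel with
  | zero => intro nul h; exact h
  | succ fuel ih =>
    intro nul h
    simp only [pvLoopA]
    split_ifs with hch
    · exact ih _ (pvPassA_nodup rules (nul, false) h)
    · exact pvPassA_nodup rules (nul, false) h

theorem pvKeys_modify_mem (d : PySem.Dict String (List (List String))) (j : String)
    (f : List (List String) → List (List String)) (h : j ∈ d.keys) :
    (d.modify j [] f).keys = d.keys := by
  rw [PySem.Dict.keys_modify,
    PySem.Dict.keys_insert_of_contains d _ ((PySem.Dict.contains_iff_mem_keys d j).mpr h)]

theorem pvKeys_foldl_pres {β : Type} (body : PySem.Dict String (List (List String)) → β → PySem.Dict String (List (List String)))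
    (key : β → String)
    (hb : ∀ d x, key x ∈ d.keys → (body d x).keys = d.keys) (xs : List β) :
    ∀ d, (∀ x ∈ xs, key x ∈ d.keys) → (xs.foldl body d).keys = d.keys := by
  induction xs with
  | nil => intro d _; rfl
  | cons x xs ih =>
    intro d h
    rw [List.foldl_cons]
    have hk := hb d x (h x List.mem_cons_self)
    rw [ih _ (fun y hy => hk ▸ h y (List.mem_cons_of_mem _ hy)), hk]

theorem pvGetD_foldl_body {β : Type}
    (body : PySem.Dict String (List (List String)) → β → PySem.Dict String (List (List String)))
    (g : List (List String) → β → List (List String)) (j : String)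
    (hb : ∀ d x k, (body d x).getD k [] = if k = j then g (d.getD j []) x else d.getD k [])
    (xs : List β) : ∀ (d : PySem.Dict String (List (List String))) (k : String),
    ((xs.foldl body d).getD k []) = if k = j then xs.foldl g (d.getD j []) else d.getD k [] := by
  induction xs with
  | nil => intro d k; by_cases h : k = j <;> simp [h]
  | cons x xs ih =>
    intro d k
    rw [List.foldl_cons, List.foldl_cons, ih]
    rw [hb d x j, hb d x k]
    by_cases h : k = j <;> simp [h]

theorem pvGetD_foldl_rules
    (body : PySem.Dict String (List (List String)) → (String × List (List String)) → PySem.Dict String (List (List String)))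
    (F : List (List String) → (String × List (List String)) → List (List String))
    (hb : ∀ d p k, (body d p).getD k [] = if k = p.1 then F (d.getD p.1 []) p else d.getD k [])
    (l : List (String × List (List String))) :
    ∀ (d : PySem.Dict String (List (List String))) (k : String),
    ((l.foldl body d).getD k []) = l.foldl (fun v p => if k = p.1 then F v p else v) (d.getD k []) := by
  induction l with
  | nil => intro d k; rfl
  | cons p l ih =>
    intro d k
    rw [List.foldl_cons, List.foldl_cons, ih]
    by_cases h : k = p.1
    · rw [hb d p k]; simp [h]
    · rw [hb d p k]; simp [h]

theorem pvFoldl_skip (F : List (List String) → (String × List (List String)) → List (List String))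
    (l : List (String × List (List String))) (k : String) (h : k ∉ l.map Prod.fst)
    (v : List (List String)) :
    l.foldl (fun v p => if k = p.1 then F v p else v) v = v := by
  induction l generalizing v with
  | nil => rfl
  | cons p l ih =>
    simp only [List.map_cons, List.mem_cons, not_or] at h
    rw [List.foldl_cons, if_neg h.1]
    exact ih h.2 v

theorem pvFoldl_unique (F : List (List String) → (String × List (List String)) → List (List String))
    (l : List (String × List (List String))) (hnd : (l.map Prod.fst).Nodup)
    (q : String × List (List String)) (hq : q ∈ l) (v : List (List String)) :
    l.foldl (fun v p => if q.1 = p.1 then F v p else v) v = F v q := by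
  induction l generalizing v with
  | nil => cases hq
  | cons p l ih =>
    rw [List.map_cons, List.nodup_cons] at hnd
    rcases List.mem_cons.mp hq with rfl | hq'
    · rw [List.foldl_cons, if_pos rfl]
      exact pvFoldl_skip F l q.1 hnd.1 (F v q)
    · have hne : q.1 ≠ p.1 := by
        intro he
        exact hnd.1 (he ▸ List.mem_map.mpr ⟨q, hq', rfl⟩)
      rw [List.foldl_cons, if_neg hne]
      exact ih hnd.2 hq' v

theorem pvDiscard_skip (N : List String) (k : String) (h : k ∉ N)
    (d : PySem.Dict String (List (List String))) :
    ((N.foldl (fun d s => d.modify s [] (fun st => PySem.Set.discard st [])) d).getD k []) = d.getD k [] := by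
  induction N generalizing d with
  | nil => rfl
  | cons s N ih =>
    simp only [List.mem_cons, not_or] at h
    rw [List.foldl_cons, ih h.2, PySem.Dict.getD_modify, if_neg h.1]

theorem pvDiscard_getD (N : List String) (hN : N.Nodup)
    (d : PySem.Dict String (List (List String))) (k : String) :
    ((N.foldl (fun d s => d.modify s [] (fun st => PySem.Set.discard st [])) d).getD k [])
      = if k ∈ N then PySem.Set.discard (d.getD k []) [] else d.getD k [] := by
  induction N generalizing d with
  | nil => simp
  | cons s N ih =>
    rw [List.nodup_cons] at hN
    rw [List.foldl_cons]
    by_cases h : k = s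
    · subst h
      rw [pvDiscard_skip N k hN.1, PySem.Dict.getD_modify, if_pos rfl]
      simp
    · rw [ih hN.2, PySem.Dict.getD_modify, if_neg h]
      by_cases hk : k ∈ N <;> simp [hk, h]

theorem pvShiftPow (k : Nat) : ((1 : Int) <<< k) = ((2 ^ k : Nat) : Int) := by
  rw [show ((1 : Int)) = ((1 : Nat) : Int) by norm_num, ← Int.natCast_shiftLeft, Nat.shiftLeft_eq]
  norm_num

-- per-source accumulated set: A's inter/inline folds = B's dedup/bitmask folds
theorem pvApply_eq (NA NB : PySem.Set String)
    (hc : ∀ x, PySem.Set.contains NA x = PySem.Set.contains NB x)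
    (ts : List (List String)) (v : List (List String)) :
    ts.foldl (fun acc t => (PySem.Set.inter (PySem.Set.ofList t) NA).foldl
        (fun acc nb => (pvInlineA t nb).foldl (fun acc nt => PySem.Set.add acc nt) acc) acc) v
      = ts.foldl (fun acc t => (PySem.List.dedup t).foldl
          (fun acc sym => if PySem.Set.contains NB sym then
              (PySem.List.pyRange 0 ((1 : Int) <<< (t.count sym)) 1).foldl
                (fun acc m => PySem.Set.add acc (pvPickB sym m t)) acc
            else acc) acc) v := by
  have hfun : (fun (acc : List (List String)) (t : List String) =>
        (PySem.Set.inter (PySem.Set.ofList t) NA).foldl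
          (fun acc nb => (pvInlineA t nb).foldl (fun acc nt => PySem.Set.add acc nt) acc) acc)
      = (fun acc t => (PySem.List.dedup t).foldl
          (fun acc sym => if PySem.Set.contains NB sym then
              (PySem.List.pyRange 0 ((1 : Int) <<< (t.count sym)) 1).foldl
                (fun acc m => PySem.Set.add acc (pvPickB sym m t)) acc
            else acc) acc) := by
    funext acc t
    have hinter : PySem.Set.inter (PySem.Set.ofList t) NA
        = (PySem.Set.ofList t).filter (fun x => PySem.Set.contains NA x) := rfl
    rw [hinter, List.foldl_filter]
    have hded : PySem.List.dedup t = PySem.Set.ofList t := rfl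
    rw [hded]
    have hinner : (fun (acc : List (List String)) (nb : String) =>
          if PySem.Set.contains NA nb = true then
            (pvInlineA t nb).foldl (fun acc nt => PySem.Set.add acc nt) acc
          else acc)
        = (fun acc sym =>
            if PySem.Set.contains NB sym then
              (PySem.List.pyRange 0 ((1 : Int) <<< (t.count sym)) 1).foldl
                (fun acc m => PySem.Set.add acc (pvPickB sym m t)) acc
            else acc) := by
      funext acc sym
      rw [hc sym]
      by_cases h : PySem.Set.contains NB sym = true
      · rw [if_pos h, if_pos h]
        rw [pvInlineA_eq, pvShiftPow, PySem.List.pyRange_zero_natCast,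
          List.foldl_map, List.foldl_map]
      · rw [if_neg h, if_neg h]
    rw [hinner]
  rw [hfun]

def pvApplyA (NA : PySem.Set String) (v : List (List String))
    (p : String × List (List String)) : List (List String) :=
  p.2.foldl (fun acc t => (PySem.Set.inter (PySem.Set.ofList t) NA).foldl
      (fun acc nb => (pvInlineA t nb).foldl (fun acc nt => PySem.Set.add acc nt) acc) acc) v

theorem pvMain (rules : List (String × List (List String)))
    (hpre : (rules.map Prod.fst).Nodup) :
    chomsky_normalize_del_py rules = chomsky_normalize_del_py_alt rules := by
  simp only [chomsky_normalize_del_py, chomsky_normalize_del_py_alt]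
  set NA := pvLoopA rules (rules.length + 1) PySem.Set.empty with hNA
  set NB := pvLoopB rules (rules.length + 1) PySem.Set.empty with hNB
  have hmem : ∀ x, x ∈ NA ↔ x ∈ NB := pvNull_equiv rules hpre
  have hcont : ∀ x, PySem.Set.contains NA x = PySem.Set.contains NB x := by
    intro x
    by_cases h : x ∈ NA
    · rw [(PySem.Set.contains_iff _ _).mpr h,
        (PySem.Set.contains_iff _ _).mpr ((hmem x).mp h)]
    · have h2 : x ∉ NB := fun hb => h ((hmem x).mpr hb)
      rw [Bool.eq_iff_iff]
      constructor
      · intro hc; exact absurd ((PySem.Set.contains_iff _ _).mp hc) h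
      · intro hc; exact absurd ((PySem.Set.contains_iff _ _).mp hc) h2
  have hNAnd : NA.Nodup := pvLoopA_nodup rules _ _ (by simp [PySem.Set.empty])
  have hsubA : ∀ x ∈ NA, x ∈ rules.map Prod.fst := by
    refine pvLoopA_sound rules (· ∈ rules.map Prod.fst) ?_ _ _ (by simp [PySem.Set.empty])
    intro s hj
    obtain ⟨ts, hmm, -⟩ := hj
    exact List.mem_map.mpr ⟨(s, ts), hmm, rfl⟩
  -- A side dicts
  set d1 := pvCopyRules rules with hd1
  have hd1items : d1.items = rules.map (fun p => (p.1, PySem.Set.ofList p.2)) := by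
    rw [hd1]
    unfold pvCopyRules
    have := PySem.Dict.items_foldl_insert_fresh rules (fun p => p.1)
      (fun p => PySem.Set.ofList p.2) PySem.Dict.empty
      (fun a _ => PySem.Dict.contains_empty _) (by simpa using hpre)
    simpa using this
  have hd1keys : d1.keys = rules.map Prod.fst := by
    show d1.items.map Prod.fst = _
    rw [hd1items, List.map_map]
    rfl
  have hd1getD : ∀ p ∈ rules, d1.getD p.1 [] = PySem.Set.ofList p.2 := by
    intro p hp
    exact PySem.Dict.getD_of_mem_items d1
      (hd1items ▸ List.mem_map.mpr ⟨p, hp, rfl⟩) (hd1keys ▸ hpre) []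
  -- the big A adds-fold
  have hbA : ∀ (d : PySem.Dict String (List (List String))) (p : String × List (List String)) (k : String),
      ((p.2.foldl (fun d t => (PySem.Set.inter (PySem.Set.ofList t) NA).foldl
          (fun d nb => (pvInlineA t nb).foldl
            (fun d nt => d.modify p.1 [] (fun st => PySem.Set.add st nt)) d) d) d).getD k [])
        = if k = p.1 then pvApplyA NA (d.getD p.1 []) p else d.getD k [] := by
    intro d p k
    exact pvGetD_foldl_body _ _ p.1
      (fun d t k => pvGetD_foldl_body _ _ p.1
        (fun d nb k => pvGetD_foldl_body _ _ p.1
          (fun d nt k => PySem.Dict.getD_modify d p.1 k [] _)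
          (pvInlineA t nb) d k)
        (PySem.Set.inter (PySem.Set.ofList t) NA) d k)
      p.2 d k
  set d2 := rules.foldl (fun d p => p.2.foldl (fun d t =>
      (PySem.Set.inter (PySem.Set.ofList t) NA).foldl (fun d nb =>
        (pvInlineA t nb).foldl (fun d nt => d.modify p.1 [] (fun st => PySem.Set.add st nt)) d) d) d) d1 with hd2
  have hd2getD : ∀ p ∈ rules, d2.getD p.1 [] = pvApplyA NA (PySem.Set.ofList p.2) p := by
    intro p hp
    rw [hd2, pvGetD_foldl_rules _ (pvApplyA NA) hbA rules d1 p.1,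
      pvFoldl_unique (pvApplyA NA) rules hpre p hp, hd1getD p hp]
  have hd2keys : d2.keys = rules.map Prod.fst := by
    rw [hd2]
    rw [pvKeys_foldl_pres _ Prod.fst ?hb rules d1 ?hc]
    · exact hd1keys
    case hb =>
      intro d p hk
      refine pvKeys_foldl_pres _ (fun _ => p.1) ?_ p.2 d (fun _ _ => hk)
      intro d t hk2
      refine pvKeys_foldl_pres _ (fun _ => p.1) ?_ _ d (fun _ _ => hk2)
      intro d nb hk3
      refine pvKeys_foldl_pres _ (fun _ => p.1) ?_ _ d (fun _ _ => hk3)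
      intro d nt hk4
      exact pvKeys_modify_mem d p.1 _ hk4
    case hc =>
      intro p hp
      rw [hd1keys]
      exact List.mem_map.mpr ⟨p, hp, rfl⟩
  set d3 := NA.foldl (fun d s => d.modify s [] (fun st => PySem.Set.discard st [])) d2 with hd3
  have hd3keys : d3.keys = rules.map Prod.fst := by
    rw [hd3]
    rw [pvKeys_foldl_pres _ (fun s => s) ?hb NA d2 ?hc]
    · exact hd2keys
    case hb =>
      intro d s hk
      exact pvKeys_modify_mem d s _ hk
    case hc =>
      intro s hs
      rw [hd2keys]
      exact hsubA s hs
  have hd3getD : ∀ k, d3.getD k []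
      = if k ∈ NA then PySem.Set.discard (d2.getD k []) [] else d2.getD k [] := by
    intro k
    rw [hd3]
    exact pvDiscard_getD NA hNAnd d2 k
  have hAitems : d3.items = rules.map (fun p => (p.1, d3.getD p.1 [])) := by
    rw [PySem.Dict.items_eq_map_keys d3 (hd3keys ▸ hpre) [], hd3keys, List.map_map]
    rfl
  -- B side dict
  have hBitems : (rules.foldl (fun d p => d.insert p.1
      (if PySem.Set.contains NB p.1 then
        PySem.Set.discard (p.2.foldl (fun acc t => (PySem.List.dedup t).foldl
          (fun acc sym => if PySem.Set.contains NB sym then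
              (PySem.List.pyRange 0 ((1 : Int) <<< (t.count sym)) 1).foldl
                (fun acc m => PySem.Set.add acc (pvPickB sym m t)) acc
            else acc) acc) (PySem.Set.ofList p.2)) []
      else p.2.foldl (fun acc t => (PySem.List.dedup t).foldl
          (fun acc sym => if PySem.Set.contains NB sym then
              (PySem.List.pyRange 0 ((1 : Int) <<< (t.count sym)) 1).foldl
                (fun acc m => PySem.Set.add acc (pvPickB sym m t)) acc
            else acc) acc) (PySem.Set.ofList p.2))) PySem.Dict.empty).items
      = rules.map (fun p => (p.1,
        if PySem.Set.contains NB p.1 then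
          PySem.Set.discard (p.2.foldl (fun acc t => (PySem.List.dedup t).foldl
            (fun acc sym => if PySem.Set.contains NB sym then
                (PySem.List.pyRange 0 ((1 : Int) <<< (t.count sym)) 1).foldl
                  (fun acc m => PySem.Set.add acc (pvPickB sym m t)) acc
              else acc) acc) (PySem.Set.ofList p.2)) []
        else p.2.foldl (fun acc t => (PySem.List.dedup t).foldl
            (fun acc sym => if PySem.Set.contains NB sym then
                (PySem.List.pyRange 0 ((1 : Int) <<< (t.count sym)) 1).foldl
                  (fun acc m => PySem.Set.add acc (pvPickB sym m t)) acc
              else acc) acc) (PySem.Set.ofList p.2))) := by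
    have := PySem.Dict.items_foldl_insert_fresh rules (fun p => p.1)
      (fun p => (if PySem.Set.contains NB p.1 then
        PySem.Set.discard (p.2.foldl (fun acc t => (PySem.List.dedup t).foldl
          (fun acc sym => if PySem.Set.contains NB sym then
              (PySem.List.pyRange 0 ((1 : Int) <<< (t.count sym)) 1).foldl
                (fun acc m => PySem.Set.add acc (pvPickB sym m t)) acc
            else acc) acc) (PySem.Set.ofList p.2)) []
      else p.2.foldl (fun acc t => (PySem.List.dedup t).foldl
          (fun acc sym => if PySem.Set.contains NB sym then
              (PySem.List.pyRange 0 ((1 : Int) <<< (t.count sym)) 1).foldl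
                (fun acc m => PySem.Set.add acc (pvPickB sym m t)) acc
            else acc) acc) (PySem.Set.ofList p.2)))
      PySem.Dict.empty (fun a _ => PySem.Dict.contains_empty _) (by simpa using hpre)
    simpa using this
  rw [hAitems, hBitems]
  refine List.map_congr_left ?_
  intro p hp
  refine Prod.ext rfl ?_
  show d3.getD p.1 [] = _
  rw [hd3getD, hd2getD p hp]
  have happ := pvApply_eq NA NB hcont p.2 (PySem.Set.ofList p.2)
  by_cases h : p.1 ∈ NA
  · rw [if_pos h, if_pos ((PySem.Set.contains_iff _ _).mpr ((hmem p.1).mp h))]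
    unfold pvApplyA
    rw [happ]
  · rw [if_neg h, if_neg (by
      intro hc
      exact h ((hmem p.1).mpr ((PySem.Set.contains_iff _ _).mp hc)))]
    unfold pvApplyA
    rw [happ]

-- ===== VERDICT (by name: the statement is the Claim_ definition above) =====
theorem chomsky_normalize_del_py_spec : Claim_equal_chomsky_normalize_del_py := by
  intro rules _ hpre
  exact pvMain rules hpre
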